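-- pv_equiv track=rewrite | github.com/ParthibuWu/prototype | format_detect.py | detect_file_format
-- ===== SOURCE A (Python) =====
-- from typing import Optional
--
-- FASTA_EXT = {".fa", ".fasta"}
--
-- FASTQ_EXT = {".fq", ".fastq"}
--
-- GENBANK_EXT = {".gb", ".gbk"}
--
-- EMBL_EXT = {".embl"}
--
-- def detect_file_format(filename: str) -> Optional[str]:
--     """Return 'fasta'/'fastq'/'genbank'/'embl' or None."""
--     name = filename.lower()
--     for ext in FASTA_EXT:
--         if name.endswith(ext):
--             return "fasta"
--     for ext in FASTQ_EXT:
--         if name.endswith(ext):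
--             return "fastq"
--     for ext in GENBANK_EXT:
--         if name.endswith(ext):
--             return "genbank"
--     for ext in EMBL_EXT:
--         if name.endswith(ext):
--             return "embl"
--     return None
-- ===== SOURCE B (Python) =====
-- EXT_MAP = {
--     ".fa": "fasta", ".fasta": "fasta",
--     ".fq": "fastq", ".fastq": "fastq",
--     ".gb": "genbank", ".gbk": "genbank",
--     ".embl": "embl",
-- }
--
-- def detect_file_format(filename):
--     """Return 'fasta'/'fastq'/'genbank'/'embl' or None."""
--     tail = []
--     for ch in reversed(filename.lower()):
--         tail.append(ch)
--         if ch == ".":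
--             return EXT_MAP.get("".join(reversed(tail)))
--     return None
-- ===== Notes on version B (the rewrite author's own statement) =====
-- stated objective: idiomatic
-- what changed: Replaces the four endswith-scanning loops over extension sets by a single backward scan that extracts the trailing dot-extension and one lookup in an extension-to-format dictionary.
import Mathlib
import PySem

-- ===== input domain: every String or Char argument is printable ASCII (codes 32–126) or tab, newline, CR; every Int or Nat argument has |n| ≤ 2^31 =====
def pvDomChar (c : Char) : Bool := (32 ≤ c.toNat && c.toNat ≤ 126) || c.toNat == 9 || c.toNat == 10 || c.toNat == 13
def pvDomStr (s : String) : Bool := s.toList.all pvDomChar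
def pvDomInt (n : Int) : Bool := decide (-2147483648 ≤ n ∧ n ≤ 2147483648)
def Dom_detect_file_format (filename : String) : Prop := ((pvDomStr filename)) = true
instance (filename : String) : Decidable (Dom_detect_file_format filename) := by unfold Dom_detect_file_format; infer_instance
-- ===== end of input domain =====

-- B replaces A's four endswith-scanning loops by one backward scan to the last dot plus a single extension→format dictionary lookup.

-- ===== PORT A =====
def pvFASTA_EXT : PySem.Set String := PySem.Set.ofList [".fa", ".fasta"]
def pvFASTQ_EXT : PySem.Set String := PySem.Set.ofList [".fq", ".fastq"]
def pvGENBANK_EXT : PySem.Set String := PySem.Set.ofList [".gb", ".gbk"]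
def pvEMBL_EXT : PySem.Set String := PySem.Set.ofList [".embl"]

-- each loop 'for ext in S: if name.endswith(ext): return r' returns r iff some element matches
-- (safe to read the set through `any`: the result does not depend on iteration order)
def detect_file_format (filename : String) : Option String :=
  let name := PySem.Str.lower filename
  if pvFASTA_EXT.any (fun ext => PySem.Str.endswith name ext) then some "fasta"
  else if pvFASTQ_EXT.any (fun ext => PySem.Str.endswith name ext) then some "fastq"
  else if pvGENBANK_EXT.any (fun ext => PySem.Str.endswith name ext) then some "genbank"
  else if pvEMBL_EXT.any (fun ext => PySem.Str.endswith name ext) then some "embl"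
  else none

-- ===== PORT B =====
def pvEXT_MAP : PySem.Dict String String :=
  PySem.Dict.ofList [(".fa", "fasta"), (".fasta", "fasta"), (".fq", "fastq"),
    (".fastq", "fastq"), (".gb", "genbank"), (".gbk", "genbank"), (".embl", "embl")]

-- the 'for ch in reversed(name)' loop of Source B: chars collected in 'tail', joined in reverse at the dot
def pvScan : List Char → List Char → Option String
  | [], _ => none
  | c :: rest, tail =>
      if c = '.' then pvEXT_MAP.get? (String.ofList (tail ++ [c]).reverse)
      else pvScan rest (tail ++ [c])

def detect_file_format_alt (filename : String) : Option String :=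
  pvScan ((PySem.Str.lower filename).toList).reverse []

-- ===== PRECONDITION & SPEC =====
def Spec_detect_file_format (filename : String) (out : Option String) : Prop := out = detect_file_format_alt filename
instance (filename : String) (out : Option String) : Decidable (Spec_detect_file_format filename out) := by unfold Spec_detect_file_format; infer_instance

-- ===== CLAIM (what is proved, stated in full; the proofs are below) =====
def Claim_equal_detect_file_format : Prop := ∀ (filename : String), Dom_detect_file_format filename → Spec_detect_file_format filename (detect_file_format filename)

-- ===== LEMMAS AND PROOFS =====

-- A's decision, phrased on the lowered character list
def chainA (L : List Char) : Option String :=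
  if ['.','f','a'] <:+ L ∨ ['.','f','a','s','t','a'] <:+ L then some "fasta"
  else if ['.','f','q'] <:+ L ∨ ['.','f','a','s','t','q'] <:+ L then some "fastq"
  else if ['.','g','b'] <:+ L ∨ ['.','g','b','k'] <:+ L then some "genbank"
  else if ['.','e','m','b','l'] <:+ L then some "embl"
  else none

lemma A_eq_chain (f : String) : detect_file_format f = chainA (PySem.Str.lower f).toList := by
  have h1 : pvFASTA_EXT = [".fa", ".fasta"] := by decide
  have h2 : pvFASTQ_EXT = [".fq", ".fastq"] := by decide
  have h3 : pvGENBANK_EXT = [".gb", ".gbk"] := by decide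
  have h4 : pvEMBL_EXT = [".embl"] := by decide
  simp only [detect_file_format, chainA, h1, h2, h3, h4, List.any_cons, List.any_nil,
    Bool.or_false, PySem.Str.endswith_eq, Bool.or_eq_true, PySem.Chars.endswith_iff,
    show (".fa" : String).toList = ['.','f','a'] from rfl,
    show (".fasta" : String).toList = ['.','f','a','s','t','a'] from rfl,
    show (".fq" : String).toList = ['.','f','q'] from rfl,
    show (".fastq" : String).toList = ['.','f','a','s','t','q'] from rfl,
    show (".gb" : String).toList = ['.','g','b'] from rfl,
    show (".gbk" : String).toList = ['.','g','b','k'] from rfl,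
    show (".embl" : String).toList = ['.','e','m','b','l'] from rfl]

lemma suffix_dot (pre acc t : List Char) (hacc : '.' ∉ acc) (ht : '.' ∉ t) :
    ('.' :: t) <:+ (pre ++ '.' :: acc) ↔ t = acc := by
  constructor
  · intro h
    have hs : ('.' :: acc) <:+ (pre ++ '.' :: acc) := List.suffix_append _ _
    rcases List.suffix_or_suffix_of_suffix h hs with h' | h'
    · rcases List.suffix_cons_iff.mp h' with h'' | h''
      · exact (List.cons.injEq _ _ _ _ ▸ h'').2
      · exact absurd (h''.subset (by simp)) hacc
    · rcases List.suffix_cons_iff.mp h' with h'' | h''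
      · exact ((List.cons.injEq _ _ _ _ ▸ h'').2).symm
      · exact absurd (h''.subset (by simp)) ht
  · rintro rfl
    exact List.suffix_append _ _

lemma scan_eq (R : List Char) : ∀ tl, '.' ∉ tl → pvScan R tl = chainA (R.reverse ++ tl.reverse) := by
  induction R with
  | nil =>
      intro tl htl
      have hacc : '.' ∉ tl.reverse := by simpa using htl
      set acc := tl.reverse with hacc_def
      simp only [pvScan, chainA, List.reverse_nil, List.nil_append]
      rw [if_neg, if_neg, if_neg, if_neg]
      · intro h; exact hacc (h.subset (by simp))
      · intro h; rcases h with h | h <;> exact hacc (h.subset (by simp))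
      · intro h; rcases h with h | h <;> exact hacc (h.subset (by simp))
      · intro h; rcases h with h | h <;> exact hacc (h.subset (by simp))
  | cons c rest ih =>
      intro tl htl
      have hacc : '.' ∉ tl.reverse := by simpa using htl
      by_cases hc : c = '.'
      · subst hc
        have hkey : (tl ++ ['.']).reverse = '.' :: tl.reverse := by simp
        set acc := tl.reverse with hacc_def
        have hmap : pvEXT_MAP = PySem.Dict.mk [(".fa", "fasta"), (".fasta", "fasta"),
            (".fq", "fastq"), (".fastq", "fastq"), (".gb", "genbank"), (".gbk", "genbank"),
            (".embl", "embl")] := by decide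
        have hofs : ∀ t : List Char, ('.' ∉ t) →
            ((String.ofList ('.' :: t) == String.ofList ('.' :: acc)) = true ↔ t = acc) := by
          intro t _
          rw [Bool.beq_eq_decide_eq, decide_eq_true_eq]
          constructor
          · intro h
            have := congrArg String.toList h
            simpa using this
          · rintro rfl; rfl
        have s1 := suffix_dot rest.reverse acc ['f','a'] hacc (by decide)
        have s2 := suffix_dot rest.reverse acc ['f','a','s','t','a'] hacc (by decide)
        have s3 := suffix_dot rest.reverse acc ['f','q'] hacc (by decide)
        have s4 := suffix_dot rest.reverse acc ['f','a','s','t','q'] hacc (by decide)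
        have s5 := suffix_dot rest.reverse acc ['g','b'] hacc (by decide)
        have s6 := suffix_dot rest.reverse acc ['g','b','k'] hacc (by decide)
        have s7 := suffix_dot rest.reverse acc ['e','m','b','l'] hacc (by decide)
        have e1 := hofs ['f','a'] (by decide)
        have e2 := hofs ['f','a','s','t','a'] (by decide)
        have e3 := hofs ['f','q'] (by decide)
        have e4 := hofs ['f','a','s','t','q'] (by decide)
        have e5 := hofs ['g','b'] (by decide)
        have e6 := hofs ['g','b','k'] (by decide)
        have e7 := hofs ['e','m','b','l'] (by decide)
        simp only [pvScan, if_pos, hkey, hmap, PySem.Dict.get?_mk_cons, chainA,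
          List.reverse_cons, List.append_assoc, List.cons_append, List.nil_append,
          show (".fa" : String) = String.ofList ['.','f','a'] from rfl,
          show (".fasta" : String) = String.ofList ['.','f','a','s','t','a'] from rfl,
          show (".fq" : String) = String.ofList ['.','f','q'] from rfl,
          show (".fastq" : String) = String.ofList ['.','f','a','s','t','q'] from rfl,
          show (".gb" : String) = String.ofList ['.','g','b'] from rfl,
          show (".gbk" : String) = String.ofList ['.','g','b','k'] from rfl,
          show (".embl" : String) = String.ofList ['.','e','m','b','l'] from rfl,
          e1, e2, e3, e4, e5, e6, e7, s1, s2, s3, s4, s5, s6, s7]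
        split_ifs <;> simp_all [PySem.Dict.get?]
      · rw [show pvScan (c :: rest) tl = pvScan rest (tl ++ [c]) by simp [pvScan, hc]]
        rw [ih (tl ++ [c]) (by simp [htl, Ne.symm, hc])]
        simp

-- ===== VERDICT (by name: the statement is the Claim_ definition above) =====
theorem detect_file_format_spec : Claim_equal_detect_file_format := by
  intro f _
  show detect_file_format f = detect_file_format_alt f
  rw [A_eq_chain, detect_file_format_alt, scan_eq _ [] (by simp)]
  simp
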